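-- pv_equiv track=rewrite | github.com/jonquixote/SmartScrape | examples/strategy_examples.py | _extract_items_and_next_page
-- ===== SOURCE A (Python) =====
-- def _extract_items_and_next_page(content: str, current_url: str) -> tuple:
--     """Extract items and next page URL from the content."""
--     # Extract items (simple version for demonstration)
--     items = []
--
--     # Find products
--     start_pos = 0
--     while True:
--         prod_start = content.find('<div class="product">', start_pos)
--         if prod_start == -1:
--             break
--
--         prod_end = content.find('</div>', prod_start)
--         if prod_end == -1:
--             break
--
--         product_text = content[prod_start + len('<div class="product">'):prod_end].strip()
--         items.append({"title": product_text})
--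
--         start_pos = prod_end
--
--     # Extract next page URL
--     next_url = None
--     next_marker = 'Next Page'
--     if next_marker in content:
--         href_pos = content.rfind('href="', 0, content.find(next_marker))
--         if href_pos != -1:
--             url_start = href_pos + len('href="')
--             url_end = content.find('"', url_start)
--             next_url = content[url_start:url_end]
--
--             # Handle relative URLs
--             if next_url.startswith('/'):
--                 base_parts = current_url.split('/')
--                 domain = '/'.join(base_parts[:3])
--                 next_url = f"{domain}{next_url}"
--             elif not next_url.startswith(('http://', 'https://')):
--                 base_url = '/'.join(current_url.split('/')[:-1])
--                 next_url = f"{base_url}/{next_url}"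
--
--     return items, next_url
-- ===== SOURCE B (Python) =====
-- def _resolve_next_url(current_url, url):
--     """Resolve a possibly-relative next-page URL against current_url."""
--     if url.startswith('/'):
--         return '/'.join(current_url.split('/')[:3]) + url
--     if url.startswith(('http://', 'https://')):
--         return url
--     return '/'.join(current_url.split('/')[:-1]) + '/' + url
--
--
-- def _extract_items_and_next_page(content: str, current_url: str) -> tuple:
--     """Extract items and next page URL from the content."""
--     # Products: consume the string with str.partition instead of index bookkeeping.
--     items = []
--     rest = content
--     while True:
--         _, sep, rest = rest.partition('<div class="product">')
--         if not sep:
--             break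
--         body, sep, rest = rest.partition('</div>')
--         if not sep:
--             break
--         items.append({"title": body.strip()})
--
--     # Next page URL
--     next_url = None
--     if 'Next Page' in content:
--         href_pos = content.rfind('href="', 0, content.find('Next Page'))
--         if href_pos != -1:
--             url_end = content.find('"', href_pos + 6)
--             next_url = _resolve_next_url(current_url, content[href_pos + 6:url_end])
--
--     return items, next_url
-- ===== Notes on version B (the rewrite author's own statement) =====
-- stated objective: idiomatic
-- what changed: The index-bookkeeping while/find product loop is replaced by a consuming str.partition scan (no positions kept at all), and the relative-URL handling is factored into a resolver helper with the absolute-URL check as an early return.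
import Mathlib
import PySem

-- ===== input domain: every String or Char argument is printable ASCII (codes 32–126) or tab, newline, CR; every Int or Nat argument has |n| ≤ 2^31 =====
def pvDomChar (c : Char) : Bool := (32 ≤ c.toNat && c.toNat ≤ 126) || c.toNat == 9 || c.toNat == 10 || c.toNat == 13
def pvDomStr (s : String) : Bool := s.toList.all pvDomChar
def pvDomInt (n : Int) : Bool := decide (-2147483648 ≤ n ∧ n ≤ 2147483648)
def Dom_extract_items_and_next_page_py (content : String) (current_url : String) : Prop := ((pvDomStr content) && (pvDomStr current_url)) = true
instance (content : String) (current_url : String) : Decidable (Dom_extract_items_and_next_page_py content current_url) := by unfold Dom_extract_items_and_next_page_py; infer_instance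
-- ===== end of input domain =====

-- B replaces A's index-bookkeeping while/find product loop by a consuming partition scan
-- and factors relative-URL handling into a resolver helper (objective: idiomatic).

-- the literal tags both Pythons use
def pvOpen : List Char := "<div class=\"product\">".toList
def pvClose : List Char := "</div>".toList
def pvMarker : List Char := "Next Page".toList
def pvHref : List Char := "href=\"".toList
def pvQuote : List Char := "\"".toList
def pvSlash : List Char := "/".toList
def pvHttp : List Char := "http://".toList
def pvHttps : List Char := "https://".toList

-- ===== PORT A =====
-- A's while-loop: integer positions start_pos/prod_start/prod_end into the whole string
-- (fuel only makes the loop structurally total; each step advances start_pos by ≥ 21).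
def pvLoopA (cs : List Char) (fuel : Nat) (start_pos : Int)
    (items : List (List (String × String))) : List (List (String × String)) :=
  match fuel with
  | 0 => items
  | fuel + 1 =>
    let prod_start := PySem.Chars.findFrom cs pvOpen start_pos
    if prod_start = -1 then items
    else
      let prod_end := PySem.Chars.findFrom cs pvClose prod_start
      if prod_end = -1 then items
      else
        let product_text := PySem.Chars.strip
          (PySem.List.slice cs (some (prod_start + 21)) (some prod_end))
        pvLoopA cs fuel prod_end (items ++ [[("title", String.ofList product_text)]])

-- A's next-page block, literally
def pvNextA (cs cu : List Char) : Option String :=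
  if PySem.Chars.isIn pvMarker cs then
    let href_pos := PySem.Chars.rfindFrom cs pvHref 0 (some (PySem.Chars.find cs pvMarker))
    if href_pos ≠ -1 then
      let url_start := href_pos + 6
      let url_end := PySem.Chars.findFrom cs pvQuote url_start
      let next_url := PySem.List.slice cs (some url_start) (some url_end)
      if PySem.Chars.startswith next_url pvSlash then
        let base_parts := PySem.Chars.splitOnMax cu pvSlash (-1)
        let domain := PySem.Chars.join pvSlash (base_parts.take 3)
        some (String.ofList (domain ++ next_url))
      else if !(PySem.Chars.startswith next_url pvHttp || PySem.Chars.startswith next_url pvHttps) then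
        let base_url := PySem.Chars.join pvSlash ((PySem.Chars.splitOnMax cu pvSlash (-1)).dropLast)
        some (String.ofList (base_url ++ pvSlash ++ next_url))
      else some (String.ofList next_url)
    else none
  else none

def extract_items_and_next_page_py (content : String) (current_url : String) :
    (List (List (String × String))) × Option String :=
  let cs := content.toList
  (pvLoopA cs (cs.length + 1) 0 [], pvNextA cs current_url.toList)

-- ===== PORT B =====
-- hand port of str.partition(sep) for sep ≠ '' (exact: first occurrence, or (s,'','') when absent)
def pvPartition (s sep : List Char) : List Char × List Char × List Char :=
  let i := PySem.Chars.find s sep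
  if i = -1 then (s, [], [])
  else (s.take i.toNat, sep, s.drop (i.toNat + sep.length))

-- B's consuming partition loop (fuel only makes the loop structurally total)
def pvLoopB (rest : List Char) (fuel : Nat) : List (List (String × String)) :=
  match fuel with
  | 0 => []
  | fuel + 1 =>
    let p1 := pvPartition rest pvOpen
    if p1.2.1 = [] then []
    else
      let p2 := pvPartition p1.2.2 pvClose
      if p2.2.1 = [] then []
      else [("title", String.ofList (PySem.Chars.strip p2.1))] :: pvLoopB p2.2.2 fuel

-- B's URL resolver helper
def pvResolve (cu url : List Char) : List Char :=
  if PySem.Chars.startswith url pvSlash then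
    PySem.Chars.join pvSlash ((PySem.Chars.splitOnMax cu pvSlash (-1)).take 3) ++ url
  else if PySem.Chars.startswith url pvHttp || PySem.Chars.startswith url pvHttps then url
  else PySem.Chars.join pvSlash ((PySem.Chars.splitOnMax cu pvSlash (-1)).dropLast) ++ pvSlash ++ url

-- B's next-page block
def pvNextB (cs cu : List Char) : Option String :=
  if PySem.Chars.isIn pvMarker cs then
    let href_pos := PySem.Chars.rfindFrom cs pvHref 0 (some (PySem.Chars.find cs pvMarker))
    if href_pos ≠ -1 then
      let url_end := PySem.Chars.findFrom cs pvQuote (href_pos + 6)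
      some (String.ofList (pvResolve cu (PySem.List.slice cs (some (href_pos + 6)) (some url_end))))
    else none
  else none

def extract_items_and_next_page_py_alt (content : String) (current_url : String) :
    (List (List (String × String))) × Option String :=
  let cs := content.toList
  (pvLoopB cs (cs.length + 1), pvNextB cs current_url.toList)

-- ===== PRECONDITION & SPEC =====
def Spec_extract_items_and_next_page_py (content : String) (current_url : String) (out : (List (List (String × String))) × Option String) : Prop := out = extract_items_and_next_page_py_alt content current_url
instance (content : String) (current_url : String) (out : (List (List (String × String))) × Option String) : Decidable (Spec_extract_items_and_next_page_py content current_url out) := by unfold Spec_extract_items_and_next_page_py; infer_instance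

-- ===== CLAIM (what is proved, stated in full; the proofs are below) =====
def Claim_equal_extract_items_and_next_page_py : Prop := ∀ (content : String) (current_url : String), Dom_extract_items_and_next_page_py content current_url → Spec_extract_items_and_next_page_py content current_url (extract_items_and_next_page_py content current_url)

-- ===== LEMMAS AND PROOFS =====

-- find points at i if there is an occurrence at i and none before
theorem pv_find_eq_of (l sub : List Char) (i : Nat)
    (hp : sub <+: l.drop i) (hmin : ∀ j < i, ¬ sub <+: l.drop j) :
    PySem.Chars.find l sub = (i : Int) := by
  have hinf : sub <:+: l := hp.isInfix.trans (List.drop_suffix i l).isInfix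
  have hne : PySem.Chars.find l sub ≠ -1 := (PySem.Chars.find_ne_neg_one_iff l sub).2 hinf
  have hnn : 0 ≤ PySem.Chars.find l sub := by
    have := PySem.Chars.neg_one_le_find l sub; omega
  obtain ⟨h1, h2⟩ := PySem.Chars.find_spec (s := l) (sub := sub) hnn
  have heq : (PySem.Chars.find l sub).toNat = i := by
    rcases Nat.lt_trichotomy (PySem.Chars.find l sub).toNat i with h | h | h
    · exact absurd h1 (hmin _ h)
    · exact h
    · exact absurd hp (h2 _ h)
  omega

-- '</div>' never starts inside the 21 characters of '<div class="product">'
theorem pv_no_close_in_open (u : List Char) (t : Nat) (ht : t < 21) :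
    ¬ pvClose <+: (pvOpen ++ u).drop t := by
  intro h
  obtain ⟨r, hr⟩ := h
  rw [List.drop_append_of_le_length (by simp [pvOpen]; omega)] at hr
  interval_cases t <;> simp [pvOpen, pvClose] at hr

-- '<div class="product">' never starts inside the 6 characters of '</div>'
theorem pv_no_open_in_close (u : List Char) (t : Nat) (ht : t < 6) :
    ¬ pvOpen <+: (pvClose ++ u).drop t := by
  intro h
  obtain ⟨r, hr⟩ := h
  rw [List.drop_append_of_le_length (by simp [pvClose]; omega)] at hr
  interval_cases t <;> simp [pvOpen, pvClose] at hr

-- first occurrence past a block that admits no occurrence inside it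
theorem pv_find_after_block (blk u sub : List Char)
    (hblk : ∀ t < blk.length, ¬ sub <+: (blk ++ u).drop t) :
    PySem.Chars.find (blk ++ u) sub =
      if PySem.Chars.find u sub = -1 then -1
      else (blk.length : Int) + PySem.Chars.find u sub := by
  have hdrop : ∀ n : Nat, (blk ++ u).drop (blk.length + n) = u.drop n := by
    intro n; exact List.drop_length_add_append n
  split_ifs with h0
  · rw [PySem.Chars.find_eq_neg_one_iff] at h0 ⊢
    intro hinf
    obtain ⟨j, hj⟩ := (PySem.Chars.exists_prefix_drop_iff_isIn sub (blk ++ u)).2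
      ((PySem.Chars.isIn_iff_infix sub (blk ++ u)).2 hinf)
    by_cases hjb : j < blk.length
    · exact hblk j hjb hj
    · have hj' : j = blk.length + (j - blk.length) := by omega
      rw [hj', hdrop] at hj
      exact h0 (hj.isInfix.trans (List.drop_suffix _ u).isInfix)
  · have hnn : 0 ≤ PySem.Chars.find u sub := by
      have := PySem.Chars.neg_one_le_find u sub; omega
    obtain ⟨h1, h2⟩ := PySem.Chars.find_spec (s := u) (sub := sub) hnn
    have := pv_find_eq_of (blk ++ u) sub (blk.length + (PySem.Chars.find u sub).toNat)
      (by rw [hdrop]; exact h1)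
      (by intro j hj hpre
          by_cases hjb : j < blk.length
          · exact hblk j hjb hpre
          · have hj2 : j = blk.length + (j - blk.length) := by omega
            rw [hj2, hdrop] at hpre
            exact h2 _ (by omega) hpre)
    rw [this]; push_cast [Int.toNat_of_nonneg hnn]; ring

-- B's first partition step only looks at the separator and what follows it
theorem pv_loopB_step_congr (r1 r2 : List Char) (fuel : Nat)
    (h : (pvPartition r1 pvOpen).2 = (pvPartition r2 pvOpen).2) :
    pvLoopB r1 (fuel + 1) = pvLoopB r2 (fuel + 1) := by
  simp only [pvLoopB]
  rw [show (pvPartition r1 pvOpen).2.1 = (pvPartition r2 pvOpen).2.1 from by rw [h],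
      show (pvPartition r1 pvOpen).2.2 = (pvPartition r2 pvOpen).2.2 from by rw [h]]

-- B's scan ignores a leading '</div>'
theorem pv_loopB_close_cons (u : List Char) (fuel : Nat) :
    pvLoopB (pvClose ++ u) fuel = pvLoopB u fuel := by
  cases fuel with
  | zero => rfl
  | succ fuel =>
    apply pv_loopB_step_congr
    have hfind := pv_find_after_block pvClose u pvOpen
      (fun t ht => pv_no_open_in_close u t (by simpa [pvClose] using ht))
    by_cases h0 : PySem.Chars.find u pvOpen = -1
    · simp [pvPartition, hfind, h0]
    · have hnn : 0 ≤ PySem.Chars.find u pvOpen := by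
        have := PySem.Chars.neg_one_le_find u pvOpen; omega
      simp only [pvPartition, hfind, if_neg h0]
      have hne : ((pvClose.length : Int) + PySem.Chars.find u pvOpen) ≠ -1 := by
        simp [show pvClose.length = 6 from by decide]; omega
      simp only [if_neg hne]
      simp only [Prod.mk.injEq, true_and]
      have ht : ((pvClose.length : Int) + PySem.Chars.find u pvOpen).toNat + pvOpen.length
          = pvClose.length + ((PySem.Chars.find u pvOpen).toNat + pvOpen.length) := by omega
      rw [ht]
      exact List.drop_length_add_append _

-- one-step evaluations of B's loop
theorem pvPartition_open_eval (rest : List Char) (i : Nat)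
    (hfo : PySem.Chars.find rest pvOpen = (i : Int)) :
    pvPartition rest pvOpen = (rest.take i, pvOpen, rest.drop (i + 21)) := by
  unfold pvPartition
  rw [hfo, if_neg (by omega)]
  simp [show pvOpen.length = 21 from by decide]

theorem pvPartition_close_eval (rest : List Char) (j : Nat)
    (hfc : PySem.Chars.find rest pvClose = (j : Int)) :
    pvPartition rest pvClose = (rest.take j, pvClose, rest.drop (j + 6)) := by
  unfold pvPartition
  rw [hfc, if_neg (by omega)]
  simp [show pvClose.length = 6 from by decide]

theorem pvLoopB_none2 (rest : List Char) (fuel : Nat) (i : Nat)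
    (hfo : PySem.Chars.find rest pvOpen = (i : Int))
    (h : PySem.Chars.find (rest.drop (i + 21)) pvClose = -1) :
    pvLoopB rest (fuel + 1) = [] := by
  simp only [pvLoopB, pvPartition_open_eval rest i hfo]
  rw [if_neg (show ¬(pvOpen = []) from by decide)]
  simp [pvPartition, h]

theorem pvLoopB_step_eval (rest : List Char) (fuel : Nat) (i j : Nat)
    (hfo : PySem.Chars.find rest pvOpen = (i : Int))
    (hfc : PySem.Chars.find (rest.drop (i + 21)) pvClose = (j : Int)) :
    pvLoopB rest (fuel + 1) =
      [("title", String.ofList (PySem.Chars.strip ((rest.drop (i + 21)).take j)))]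
        :: pvLoopB ((rest.drop (i + 21)).drop (j + 6)) fuel := by
  simp only [pvLoopB, pvPartition_open_eval rest i hfo,
    pvPartition_close_eval (rest.drop (i + 21)) j hfc]
  rw [if_neg (show ¬(pvOpen = []) from by decide)]
  rw [if_neg (show ¬(pvClose = []) from by decide)]

-- the main loop correspondence: A at absolute position k equals B on the dropped suffix
theorem pv_loop_eq (fuel : Nat) : ∀ (cs : List Char) (k : Nat)
    (acc : List (List (String × String))), k ≤ cs.length →
    pvLoopA cs fuel (k : Int) acc = acc ++ pvLoopB (cs.drop k) fuel := by
  induction fuel with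
  | zero => intro cs k acc hk; simp [pvLoopA, pvLoopB]
  | succ fuel ih =>
    intro cs k acc hk
    have hlen_open : pvOpen.length = 21 := by decide
    have hlen_close : pvClose.length = 6 := by decide
    have hdlen : (cs.drop k).length = cs.length - k := by simp
    have dd : ∀ (l : List Char) (m n p : Nat), m + n = p → (l.drop m).drop n = l.drop p := by
      intro l m n p h; subst h; exact List.drop_drop
    have hffA := PySem.Chars.findFrom_natCast cs pvOpen k hk
    by_cases h0 : PySem.Chars.find (cs.drop k) pvOpen = -1
    · simp [pvLoopA, pvLoopB, pvPartition, hffA, h0]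
    · have hnn : 0 ≤ PySem.Chars.find (cs.drop k) pvOpen := by
        have := PySem.Chars.neg_one_le_find (cs.drop k) pvOpen; omega
      obtain ⟨hpre, hmin⟩ := PySem.Chars.find_spec (s := cs.drop k) (sub := pvOpen) hnn
      set i := (PySem.Chars.find (cs.drop k) pvOpen).toNat with hi
      have hieq : PySem.Chars.find (cs.drop k) pvOpen = (i : Int) :=
        (Int.toNat_of_nonneg hnn).symm
      have hps : PySem.Chars.findFrom cs pvOpen (k : Int) = ((k + i : Nat) : Int) := by
        rw [hffA, if_neg h0, hieq]; omega
      have hlen_i : i + 21 ≤ (cs.drop k).length := by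
        have h1 := hpre.length_le
        simp only [hlen_open, List.length_drop] at h1
        omega
      have he : (cs.drop k).drop i = pvOpen ++ (cs.drop k).drop (i + 21) := by
        obtain ⟨t, ht⟩ := hpre
        have h21 : (cs.drop k).drop (i + 21) = t := by
          rw [(dd (cs.drop k) i 21 (i + 21) rfl).symm, ← ht, ← hlen_open, List.drop_left]
        rw [h21, ht]
      have hk2 : k + i ≤ cs.length := by omega
      have hffA2 := PySem.Chars.findFrom_natCast cs pvClose (k + i) hk2
      have hdd : cs.drop (k + i) = (cs.drop k).drop i := (dd cs k i (k + i) rfl).symm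
      have hshift : PySem.Chars.find ((cs.drop k).drop i) pvClose =
          if PySem.Chars.find ((cs.drop k).drop (i + 21)) pvClose = -1 then -1
          else (21 : Int) + PySem.Chars.find ((cs.drop k).drop (i + 21)) pvClose := by
        rw [he]
        have := pv_find_after_block pvOpen ((cs.drop k).drop (i + 21)) pvClose
          (fun t ht => pv_no_close_in_open _ t (by omega))
        rw [this, hlen_open]; norm_num
      by_cases h1 : PySem.Chars.find ((cs.drop k).drop (i + 21)) pvClose = -1
      · -- no closing tag: A's pe = -1, B's second partition has empty separator
        have hpe : PySem.Chars.findFrom cs pvClose ((k + i : Nat) : Int) = -1 := by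
          rw [hffA2, hdd, hshift, if_pos h1]; simp
        have hne1 : ((k + i : Nat) : Int) ≠ -1 := by omega
        simp only [pvLoopA, hps, if_neg hne1, hpe]
        rw [pvLoopB_none2 (cs.drop k) fuel i hieq h1]
        simp
      · have hnn' : 0 ≤ PySem.Chars.find ((cs.drop k).drop (i + 21)) pvClose := by
          have := PySem.Chars.neg_one_le_find ((cs.drop k).drop (i + 21)) pvClose; omega
        obtain ⟨hpre2, hmin2⟩ :=
          PySem.Chars.find_spec (s := (cs.drop k).drop (i + 21)) (sub := pvClose) hnn'
        set j := (PySem.Chars.find ((cs.drop k).drop (i + 21)) pvClose).toNat with hj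
        have hjeq : PySem.Chars.find ((cs.drop k).drop (i + 21)) pvClose = (j : Int) :=
          (Int.toNat_of_nonneg hnn').symm
        have hpe : PySem.Chars.findFrom cs pvClose ((k + i : Nat) : Int)
            = ((k + i + 21 + j : Nat) : Int) := by
          rw [hffA2, hdd, hshift, if_neg h1, hjeq]
          rw [if_neg (by omega)]
          omega
        have hlen_j : j + 6 ≤ ((cs.drop k).drop (i + 21)).length := by
          have h2 := hpre2.length_le
          simp only [hlen_close, List.length_drop] at h2 ⊢
          omega
        have hK : k + i + 21 + j ≤ cs.length := by
          simp only [List.length_drop] at hlen_j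
          omega
        -- the extracted text agrees
        have hr1 : cs.drop (k + i + 21) = (cs.drop k).drop (i + 21) :=
          (dd cs k (i + 21) (k + i + 21) (by omega)).symm
        have hslice : PySem.List.slice cs (some (((k + i : Nat) : Int) + 21))
            (some ((k + i + 21 + j : Nat) : Int)) = ((cs.drop k).drop (i + 21)).take j := by
          rw [show (((k + i : Nat) : Int) + 21) = ((k + i + 21 : Nat) : Int) by push_cast; ring,
            PySem.List.slice_natCast, hr1]
          congr 1
          omega
        -- the remainder after the closing tag
        have he2 : ((cs.drop k).drop (i + 21)).drop j
            = pvClose ++ ((cs.drop k).drop (i + 21)).drop (j + 6) := by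
          obtain ⟨t, ht⟩ := hpre2
          have h6 : ((cs.drop k).drop (i + 21)).drop (j + 6) = t := by
            rw [(dd ((cs.drop k).drop (i + 21)) j 6 (j + 6) rfl).symm, ← ht, ← hlen_close,
              List.drop_left]
          rw [h6, ht]
        have hcsK : cs.drop (k + i + 21 + j) = ((cs.drop k).drop (i + 21)).drop j := by
          rw [← hr1]; exact (dd cs (k + i + 21) j (k + i + 21 + j) rfl).symm
        -- unfold A one step
        have hne1 : ((k + i : Nat) : Int) ≠ -1 := by omega
        have hne2 : ((k + i + 21 + j : Nat) : Int) ≠ -1 := by omega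
        simp only [pvLoopA, hps, if_neg hne1, hpe, if_neg hne2, hslice]
        rw [ih cs (k + i + 21 + j) _ hK, hcsK, he2, pv_loopB_close_cons]
        -- unfold B one step
        rw [pvLoopB_step_eval (cs.drop k) fuel i j hieq hjeq]
        simp

-- the two next-page blocks agree
theorem pv_next_eq (cs cu : List Char) : pvNextA cs cu = pvNextB cs cu := by
  simp only [pvNextA, pvNextB, pvResolve]
  split_ifs <;> simp_all

-- ===== VERDICT (by name: the statement is the Claim_ definition above) =====
theorem extract_items_and_next_page_py_spec : Claim_equal_extract_items_and_next_page_py := by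
  intro content current_url _
  show _ = _
  unfold extract_items_and_next_page_py extract_items_and_next_page_py_alt
  dsimp only
  have h := pv_loop_eq (content.toList.length + 1) content.toList 0 [] (Nat.zero_le _)
  simp only [List.drop_zero, List.nil_append, Nat.cast_zero] at h
  rw [h, pv_next_eq]
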